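-- pv_equiv track=rewrite | github.com/fluencelabs/rust-peer | deploy/fluence.py | parse_peer_ids
-- ===== SOURCE A (Python) =====
-- PEER_ID_MARKER = "server peer id"
--
-- def parse_peer_ids(logs):
--     def after_eq(line):
--         return line.split("=")[-1].strip()
--
--     peer_id = None
--     for line in logs:
--         if PEER_ID_MARKER in line:
--             peer_id = after_eq(line)
--     return peer_id
-- ===== SOURCE B (Python) =====
-- PEER_ID_MARKER = "server peer id"
--
-- def parse_peer_ids(logs):
--     def after_eq(line):
--         return line.split("=")[-1].strip()
--
--     for line in reversed(list(logs)):
--         if PEER_ID_MARKER in line: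
--             return after_eq(line)
--     return None
-- ===== Notes on version B (the rewrite author's own statement) =====
-- stated objective: alternative
-- what changed: B scans the materialised log list in reverse and returns at the first marker line (early exit), instead of A's forward scan that overwrites a running variable and always reads every line.
import Mathlib
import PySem

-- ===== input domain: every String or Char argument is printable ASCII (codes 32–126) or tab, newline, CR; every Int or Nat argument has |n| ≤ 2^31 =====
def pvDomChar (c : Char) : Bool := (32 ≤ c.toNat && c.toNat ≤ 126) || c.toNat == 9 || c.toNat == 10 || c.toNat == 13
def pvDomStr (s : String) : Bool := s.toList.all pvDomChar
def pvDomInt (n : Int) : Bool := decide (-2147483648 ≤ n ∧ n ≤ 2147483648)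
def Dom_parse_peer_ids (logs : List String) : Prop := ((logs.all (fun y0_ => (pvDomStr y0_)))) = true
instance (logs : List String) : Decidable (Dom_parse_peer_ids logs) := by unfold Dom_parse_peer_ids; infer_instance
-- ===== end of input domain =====

-- B iterates the log list in reverse and returns at the first marker line (early exit),
-- instead of A's forward scan that overwrites a running variable; same value everywhere.

-- ===== PORT A =====
-- line.split("=")[-1].strip()  ([-1] always exists: split on a nonempty sep is nonempty)
def pvAfterEq (line : String) : String :=
  PySem.Str.strip (((PySem.List.pyGet? ((PySem.Str.split? line "=").getD []) (-1))).getD "")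

def parse_peer_ids (logs : List String) : Option String :=
  logs.foldl
    (fun peer_id line =>
      if PySem.Str.isIn "server peer id" line then some (pvAfterEq line) else peer_id)
    none

-- ===== PORT B =====
-- early-return loop over the reversed list
def pvFindRev : List String → Option String
  | [] => none
  | line :: rest =>
      if PySem.Str.isIn "server peer id" line then some (pvAfterEq line) else pvFindRev rest

def parse_peer_ids_alt (logs : List String) : Option String :=
  pvFindRev logs.reverse

-- ===== PRECONDITION & SPEC =====
def Spec_parse_peer_ids (logs : List String) (out : Option String) : Prop := out = parse_peer_ids_alt logs
instance (logs : List String) (out : Option String) : Decidable (Spec_parse_peer_ids logs out) := by unfold Spec_parse_peer_ids; infer_instance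

-- ===== CLAIM (what is proved, stated in full; the proofs are below) =====
def Claim_equal_parse_peer_ids : Prop := ∀ (logs : List String), Dom_parse_peer_ids logs → Spec_parse_peer_ids logs (parse_peer_ids logs)

-- ===== LEMMAS AND PROOFS =====

theorem pvFindRev_append (l m : List String) :
    pvFindRev (l ++ m) = ((pvFindRev l).rec (pvFindRev m) (fun x => some x) : Option String) := by
  induction l with
  | nil => simp [pvFindRev]
  | cons a t ih =>
      simp only [List.cons_append, pvFindRev]
      split_ifs <;> simp [ih]

theorem pvFold_eq (logs : List String) (acc : Option String) :
    logs.foldl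
      (fun peer_id line =>
        if PySem.Str.isIn "server peer id" line then some (pvAfterEq line) else peer_id)
      acc
    = ((pvFindRev logs.reverse).rec acc (fun x => some x) : Option String) := by
  induction logs generalizing acc with
  | nil => simp [pvFindRev]
  | cons a t ih =>
      simp only [List.foldl_cons, List.reverse_cons, ih, pvFindRev_append]
      cases pvFindRev t.reverse <;> simp [pvFindRev] <;> (split_ifs; rfl; rfl)

-- ===== VERDICT (by name: the statement is the Claim_ definition above) =====
theorem parse_peer_ids_spec : Claim_equal_parse_peer_ids := by
  intro logs _
  unfold Spec_parse_peer_ids parse_peer_ids parse_peer_ids_alt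
  rw [pvFold_eq]
  cases pvFindRev logs.reverse <;> rfl
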